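-- pv_equiv track=rewrite | github.com/aleroldan95/teco-multi-echelon | data_loader_class.py | get_moving_price
-- ===== SOURCE A (Python) =====
-- def get_moving_price(weight, travel_time):
--     prices = {1: [430, 595],  # [regional, nacional]
--               5: [520, 735],
--               10: [655, 975],
--               15: [795, 1205],
--               20: [955, 1410],
--               25: [1155, 1690]}
--     if travel_time <= 3:  # regional
--         indice = 0
--     else: # nacional
--         indice = 1
--     last_w = min(prices.keys())
--     for w in sorted(prices.keys()):
--         if w > weight:
--             return prices[last_w][indice]
--         last_w = w
--     return prices[last_w][indice]
-- ===== SOURCE B (Python) =====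
-- def get_moving_price(weight, travel_time):
--     prices = {1: [430, 595], 5: [520, 735], 10: [655, 975],
--               15: [795, 1205], 20: [955, 1410], 25: [1155, 1690]}
--     keys = sorted(prices)
--     lo, hi = 0, len(keys)
--     while lo < hi:  # hand-written bisect_right (no imports in the original module)
--         mid = (lo + hi) // 2
--         if weight < keys[mid]:
--             hi = mid
--         else:
--             lo = mid + 1
--     bracket = keys[0] if lo == 0 else keys[lo - 1]
--     return prices[bracket][0 if travel_time <= 3 else 1]
-- ===== Notes on version B (the rewrite author's own statement) =====
-- stated objective: alternative
-- what changed: Replaces A's sequential last_w-tracking scan over the sorted keys (with an early return) by a hand-written bisect_right binary search into the sorted key list, clamping index 0 to the minimum key.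
import Mathlib
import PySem

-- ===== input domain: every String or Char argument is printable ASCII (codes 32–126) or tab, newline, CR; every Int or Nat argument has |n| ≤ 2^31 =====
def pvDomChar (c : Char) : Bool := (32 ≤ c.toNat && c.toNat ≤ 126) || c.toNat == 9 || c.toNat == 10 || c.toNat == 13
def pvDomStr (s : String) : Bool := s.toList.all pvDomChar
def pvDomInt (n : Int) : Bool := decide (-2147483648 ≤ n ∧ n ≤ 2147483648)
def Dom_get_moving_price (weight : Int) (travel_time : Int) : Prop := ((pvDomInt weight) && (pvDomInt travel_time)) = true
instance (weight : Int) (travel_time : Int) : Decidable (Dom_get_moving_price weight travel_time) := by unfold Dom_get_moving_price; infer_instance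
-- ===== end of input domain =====

-- ===== PORT A =====
-- B replaces A's sequential last_w scan over sorted keys with a hand-written
-- binary search (bisect_right) into the sorted key list; alternative decomposition, same cost.

-- prices[w][indice] for A; keys are always present and indice ∈ {0,1}, so the
-- getD defaults are never used (exact on all reachable lookups).
def pvPrices : PySem.Dict Int (List Int) :=
  PySem.Dict.ofList [(1, [430, 595]), (5, [520, 735]), (10, [655, 975]),
                     (15, [795, 1205]), (20, [955, 1410]), (25, [1155, 1690])]

def pvLookup (w indice : Int) : Int :=
  (PySem.List.pyGet? ((PySem.Dict.get? pvPrices w).getD []) indice).getD 0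

-- the for-loop with its early return and last_w accumulator
def pvScan (keys : List Int) (last_w weight indice : Int) : Int :=
  match keys with
  | [] => pvLookup last_w indice
  | w :: rest => if w > weight then pvLookup last_w indice else pvScan rest w weight indice

def get_moving_price (weight : Int) (travel_time : Int) : Int :=
  let indice : Int := if travel_time ≤ 3 then 0 else 1
  let last_w : Int := 1  -- min(prices.keys())
  pvScan [1, 5, 10, 15, 20, 25] last_w weight indice

-- ===== PORT B =====
-- the while lo < hi binary-search loop of Source B
def pvBisect (keys : List Int) (weight : Int) (lo hi : Nat) : Nat :=
  if _h : lo < hi then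
    let mid := (lo + hi) / 2
    if weight < (PySem.List.pyGet? keys (mid : Int)).getD 0 then
      pvBisect keys weight lo mid
    else
      pvBisect keys weight (mid + 1) hi
  else lo
termination_by hi - lo
decreasing_by all_goals omega

def get_moving_price_alt (weight : Int) (travel_time : Int) : Int :=
  let keys : List Int := [1, 5, 10, 15, 20, 25]
  let lo := pvBisect keys weight 0 keys.length
  let bracket : Int :=
    if lo = 0 then (PySem.List.pyGet? keys (0 : Int)).getD 0
    else (PySem.List.pyGet? keys ((lo : Int) - 1)).getD 0
  pvLookup bracket (if travel_time ≤ 3 then 0 else 1)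

-- ===== PRECONDITION & SPEC =====
def Spec_get_moving_price (weight : Int) (travel_time : Int) (out : Int) : Prop := out = get_moving_price_alt weight travel_time
instance (weight : Int) (travel_time : Int) (out : Int) : Decidable (Spec_get_moving_price weight travel_time out) := by unfold Spec_get_moving_price; infer_instance

-- ===== CLAIM (what is proved, stated in full; the proofs are below) =====
def Claim_equal_get_moving_price : Prop := ∀ (weight : Int) (travel_time : Int), Dom_get_moving_price weight travel_time → Spec_get_moving_price weight travel_time (get_moving_price weight travel_time)

-- ===== LEMMAS AND PROOFS =====

-- evaluate both programs on each weight bracket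
lemma pvScan_eval (weight indice : Int) :
    pvScan [1, 5, 10, 15, 20, 25] 1 weight indice =
      if weight < 1 then pvLookup 1 indice
      else if weight < 5 then pvLookup 1 indice
      else if weight < 10 then pvLookup 5 indice
      else if weight < 15 then pvLookup 10 indice
      else if weight < 20 then pvLookup 15 indice
      else if weight < 25 then pvLookup 20 indice
      else pvLookup 25 indice := by
  simp only [pvScan]

set_option maxRecDepth 4000 in
lemma pvBisect_eval (weight : Int) :
    pvBisect [1, 5, 10, 15, 20, 25] weight 0 6 =
      if weight < 1 then 0
      else if weight < 5 then 1
      else if weight < 10 then 2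
      else if weight < 15 then 3
      else if weight < 20 then 4
      else if weight < 25 then 5
      else 6 := by
  simp [pvBisect, PySem.List.pyGet?, PySem.List.pyIdx?]
  split_ifs <;> omega

-- ===== VERDICT (by name: the statement is the Claim_ definition above) =====
theorem get_moving_price_spec : Claim_equal_get_moving_price := by
  intro weight travel_time _
  unfold Spec_get_moving_price get_moving_price get_moving_price_alt
  simp only [List.length_cons, List.length_nil]
  rw [pvScan_eval, pvBisect_eval]
  split_ifs <;> simp_all
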